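-- pv_equiv track=rewrite | github.com/RemcoSchrijver/advent-of-code | 2024/src/day08.py | get_number_anti_nodes
-- ===== SOURCE A (Python) =====
-- def get_number_anti_nodes(
--     max_y, max_x, antenna_position_map: dict[str, list[tuple[int, int]]]
-- ) -> int:
--     anti_node_pos = set()
--     for antenna_positions in antenna_position_map.values():
--         for i, antenna_pos in enumerate(antenna_positions):
--             for j, other_antenna_pos in enumerate(antenna_positions):
--                 if i == j:
--                     continue
--                 this_y, this_x = antenna_pos
--                 other_y, other_x = other_antenna_pos
--                 new_y = other_y - this_y + other_y
--                 new_x = other_x - this_x + other_x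
--                 if new_y >= 0 and new_y < max_y and new_x >= 0 and new_x < max_x:
--                     anti_node_pos.add((new_y, new_x))
--     return len(anti_node_pos)
-- ===== SOURCE B (Python) =====
-- def get_number_anti_nodes(
--     max_y, max_x, antenna_position_map: dict[str, list[tuple[int, int]]]
-- ) -> int:
--     # Different decomposition: dedupe each frequency's positions with a count map,
--     # reflect only over pairs of DISTINCT positions, and handle the degenerate
--     # "same position twice" case (whose reflection is the position itself)
--     # separately via the multiplicities.
--     anti_node_pos = set()
--     for positions in antenna_position_map.values():
--         counts = {}
--         for p in positions:
--             counts[p] = counts.get(p, 0) + 1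
--         distinct = list(counts)
--         for a in distinct:
--             for b in distinct:
--                 if a != b:
--                     q = (2 * b[0] - a[0], 2 * b[1] - a[1])
--                     if 0 <= q[0] < max_y and 0 <= q[1] < max_x:
--                         anti_node_pos.add(q)
--         for p, c in counts.items():
--             if c >= 2 and 0 <= p[0] < max_y and 0 <= p[1] < max_x:
--                 anti_node_pos.add(p)
--     return len(anti_node_pos)
-- ===== Notes on version B (the rewrite author's own statement) =====
-- stated objective: alternative
-- what changed: Replaces A's ordered double loop over all index pairs (i != j) by a count-map decomposition: build a multiplicity dict per frequency, reflect only over pairs of distinct positions, and add duplicated positions themselves (the reflection of a position over an equal one) in a separate pass over the counts.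
import Mathlib
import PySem

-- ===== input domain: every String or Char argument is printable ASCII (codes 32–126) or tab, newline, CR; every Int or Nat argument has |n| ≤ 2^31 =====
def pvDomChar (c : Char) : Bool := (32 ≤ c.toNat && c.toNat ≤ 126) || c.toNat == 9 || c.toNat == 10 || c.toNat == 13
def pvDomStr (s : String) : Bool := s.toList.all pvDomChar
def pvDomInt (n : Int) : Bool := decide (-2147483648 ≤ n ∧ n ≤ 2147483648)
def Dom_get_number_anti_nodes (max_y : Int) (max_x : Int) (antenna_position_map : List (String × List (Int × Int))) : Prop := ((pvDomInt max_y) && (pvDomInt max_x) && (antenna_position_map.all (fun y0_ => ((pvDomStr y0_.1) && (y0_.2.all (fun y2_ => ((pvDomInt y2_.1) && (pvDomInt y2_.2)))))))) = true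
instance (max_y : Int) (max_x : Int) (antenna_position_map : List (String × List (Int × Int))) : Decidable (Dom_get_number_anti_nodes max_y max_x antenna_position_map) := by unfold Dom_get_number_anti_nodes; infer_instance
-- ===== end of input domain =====

-- B replaces A's ordered index-pair sweep by a count-map decomposition: dedupe each
-- frequency's positions, reflect over pairs of DISTINCT positions only, and recover the
-- degenerate "same position at two indices" reflections from the multiplicities.

-- ===== PORT A =====
-- body of A's innermost loop: skip when i == j, else reflect and add when in bounds
def pvA_step (max_y max_x : Int) (ip jp : Int × (Int × Int))
    (s : PySem.Set (Int × Int)) : PySem.Set (Int × Int) :=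
  if ip.1 = jp.1 then s
  else
    let new_y := jp.2.1 - ip.2.1 + jp.2.1
    let new_x := jp.2.2 - ip.2.2 + jp.2.2
    if 0 ≤ new_y ∧ new_y < max_y ∧ 0 ≤ new_x ∧ new_x < max_x then
      PySem.Set.add s (new_y, new_x)
    else s

-- the two nested 'for i, …' / 'for j, …' loops over enumerate(antenna_positions)
def pvA_freq (max_y max_x : Int) (l : List (Int × Int))
    (s : PySem.Set (Int × Int)) : PySem.Set (Int × Int) :=
  (PySem.List.enumerate l).foldl (fun s ip =>
    (PySem.List.enumerate l).foldl (fun s jp => pvA_step max_y max_x ip jp s) s) s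

def get_number_anti_nodes (max_y : Int) (max_x : Int) (antenna_position_map : List (String × List (Int × Int))) : Int :=
  PySem.Set.len (antenna_position_map.foldl
    (fun s kv => pvA_freq max_y max_x kv.2 s) PySem.Set.empty)

-- ===== PORT B =====
-- 'counts[p] = counts.get(p, 0) + 1' loop building the count map
def pvB_counts (l : List (Int × Int)) : PySem.Dict (Int × Int) Int :=
  l.foldl (fun d p => d.insert p (d.getD p 0 + 1)) PySem.Dict.empty

-- body of 'for b in distinct': reflect a over b unless a == b, add when in bounds
def pvB_refl_step (max_y max_x : Int) (a : Int × Int)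
    (s : PySem.Set (Int × Int)) (b : Int × Int) : PySem.Set (Int × Int) :=
  if a ≠ b then
    let q := (2 * b.1 - a.1, 2 * b.2 - a.2)
    if 0 ≤ q.1 ∧ q.1 < max_y ∧ 0 ≤ q.2 ∧ q.2 < max_x then PySem.Set.add s q else s
  else s

-- the double loop over the distinct positions
def pvB_pairs (max_y max_x : Int) (distinct : List (Int × Int))
    (s : PySem.Set (Int × Int)) : PySem.Set (Int × Int) :=
  distinct.foldl (fun s a => distinct.foldl (pvB_refl_step max_y max_x a) s) s

-- 'for p, c in counts.items(): if c >= 2 and in bounds: add p'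
def pvB_dups (max_y max_x : Int) (items : List ((Int × Int) × Int))
    (s : PySem.Set (Int × Int)) : PySem.Set (Int × Int) :=
  items.foldl (fun s pc =>
    if 2 ≤ pc.2 ∧ 0 ≤ pc.1.1 ∧ pc.1.1 < max_y ∧ 0 ≤ pc.1.2 ∧ pc.1.2 < max_x then
      PySem.Set.add s pc.1
    else s) s

def pvB_freq (max_y max_x : Int) (l : List (Int × Int))
    (s : PySem.Set (Int × Int)) : PySem.Set (Int × Int) :=
  let counts := pvB_counts l
  pvB_dups max_y max_x counts.items (pvB_pairs max_y max_x counts.keys s)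

def get_number_anti_nodes_alt (max_y : Int) (max_x : Int) (antenna_position_map : List (String × List (Int × Int))) : Int :=
  PySem.Set.len (antenna_position_map.foldl
    (fun s kv => pvB_freq max_y max_x kv.2 s) PySem.Set.empty)

-- ===== PRECONDITION & SPEC =====
def Spec_get_number_anti_nodes (max_y : Int) (max_x : Int) (antenna_position_map : List (String × List (Int × Int))) (out : Int) : Prop := out = get_number_anti_nodes_alt max_y max_x antenna_position_map
instance (max_y : Int) (max_x : Int) (antenna_position_map : List (String × List (Int × Int))) (out : Int) : Decidable (Spec_get_number_anti_nodes max_y max_x antenna_position_map out) := by unfold Spec_get_number_anti_nodes; infer_instance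

-- ===== CLAIM (what is proved, stated in full; the proofs are below) =====
def Claim_equal_get_number_anti_nodes : Prop := ∀ (max_y : Int) (max_x : Int) (antenna_position_map : List (String × List (Int × Int))), Dom_get_number_anti_nodes max_y max_x antenna_position_map → Spec_get_number_anti_nodes max_y max_x antenna_position_map (get_number_anti_nodes max_y max_x antenna_position_map)

-- ===== LEMMAS AND PROOFS =====

-- in-bounds test and the reflection of a over b, in normal form
def pvInB (max_y max_x : Int) (p : Int × Int) : Prop :=
  0 ≤ p.1 ∧ p.1 < max_y ∧ 0 ≤ p.2 ∧ p.2 < max_x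

def pvRefl (a b : Int × Int) : Int × Int := (2 * b.1 - a.1, 2 * b.2 - a.2)

-- "y is the in-bounds reflection of a over b"
def pvC (max_y max_x : Int) (a b : Int × Int) (y : Int × Int) : Prop :=
  pvInB max_y max_x (pvRefl a b) ∧ y = pvRefl a b

-- the set of points one frequency's antenna list contributes
def pvGen (max_y max_x : Int) (l : List (Int × Int)) (y : Int × Int) : Prop :=
  ∃ i j : Nat, i < l.length ∧ j < l.length ∧ i ≠ j ∧
    pvC max_y max_x (l.getD i (0, 0)) (l.getD j (0, 0)) y

theorem pvGetD_eq (l : List (Int × Int)) (i : Nat) (hi : i < l.length) :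
    l.getD i (0, 0) = l[i] := List.getD_eq_getElem l (0, 0) hi

theorem pvRefl_self (p : Int × Int) : pvRefl p p = p := by
  unfold pvRefl
  ext <;> simp <;> ring

-- ---- A side: membership ----

theorem pvA_step_mem (max_y max_x : Int) (ip jp : Int × (Int × Int))
    (s : PySem.Set (Int × Int)) (y : Int × Int) :
    y ∈ pvA_step max_y max_x ip jp s ↔
      y ∈ s ∨ (ip.1 ≠ jp.1 ∧ pvC max_y max_x ip.2 jp.2 y) := by
  have h1 : jp.2.1 - ip.2.1 + jp.2.1 = 2 * jp.2.1 - ip.2.1 := by ring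
  have h2 : jp.2.2 - ip.2.2 + jp.2.2 = 2 * jp.2.2 - ip.2.2 := by ring
  simp only [pvA_step, pvC, pvInB, pvRefl, h1, h2]
  split_ifs with he hb <;> (try simp only [PySem.Set.mem_add]) <;> tauto

theorem pvA_inner_mem (max_y max_x : Int) (ip : Int × (Int × Int))
    (E : List (Int × (Int × Int))) :
    ∀ (s : PySem.Set (Int × Int)) (y : Int × Int),
      y ∈ E.foldl (fun s jp => pvA_step max_y max_x ip jp s) s ↔
        y ∈ s ∨ ∃ jp ∈ E, ip.1 ≠ jp.1 ∧ pvC max_y max_x ip.2 jp.2 y := by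
  induction E with
  | nil => simp
  | cons t E ih =>
    intro s y
    rw [List.foldl_cons, ih, pvA_step_mem]
    simp only [List.mem_cons, exists_eq_or_imp]
    rw [or_assoc]

theorem pvA_freq_mem (max_y max_x : Int) (l : List (Int × Int)) :
    ∀ (s : PySem.Set (Int × Int)) (y : Int × Int),
      y ∈ pvA_freq max_y max_x l s ↔ y ∈ s ∨ pvGen max_y max_x l y := by
  unfold pvA_freq
  have houter : ∀ (E : List (Int × (Int × Int))) (s : PySem.Set (Int × Int)) (y : Int × Int),
      y ∈ E.foldl (fun s ip =>
          (PySem.List.enumerate l).foldl (fun s jp => pvA_step max_y max_x ip jp s) s) s ↔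
        y ∈ s ∨ ∃ ip ∈ E, ∃ jp ∈ PySem.List.enumerate l,
          ip.1 ≠ jp.1 ∧ pvC max_y max_x ip.2 jp.2 y := by
    intro E
    induction E with
    | nil => simp
    | cons t E ih =>
      intro s y
      rw [List.foldl_cons, ih, pvA_inner_mem]
      simp only [List.mem_cons, exists_eq_or_imp]
      rw [or_assoc]
  intro s y
  rw [houter]
  constructor
  · rintro (hs | ⟨ip, hip, jp, hjp, hne, hc⟩)
    · exact Or.inl hs
    · refine Or.inr ?_
      rw [PySem.List.mem_enumerate_iff] at hip hjp
      obtain ⟨i, hi, rfl⟩ := hip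
      obtain ⟨j, hj, rfl⟩ := hjp
      refine ⟨i, j, hi, hj, ?_, ?_⟩
      · intro h; apply hne; simp [h]
      · rw [pvGetD_eq l i hi, pvGetD_eq l j hj]
        exact hc
  · rintro (hs | ⟨i, j, hi, hj, hne, hc⟩)
    · exact Or.inl hs
    · refine Or.inr ⟨(0 + (i : Int), l[i]), ?_, (0 + (j : Int), l[j]), ?_, ?_, ?_⟩
      · rw [PySem.List.mem_enumerate_iff]; exact ⟨i, hi, rfl⟩
      · rw [PySem.List.mem_enumerate_iff]; exact ⟨j, hj, rfl⟩
      · simp; omega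
      · rw [pvGetD_eq l i hi, pvGetD_eq l j hj] at hc
        exact hc

-- ---- index pairs with equal values vs. count ≥ 2 ----

theorem pvTwoLeCount_iff (l : List (Int × Int)) (p : Int × Int) :
    2 ≤ l.count p ↔
      ∃ i j : Nat, i < l.length ∧ j < l.length ∧ i ≠ j ∧
        l.getD i (0, 0) = p ∧ l.getD j (0, 0) = p := by
  induction l with
  | nil => simp
  | cons a t ih =>
    rw [List.count_cons]
    by_cases hap : a = p
    · subst hap
      simp only [beq_self_eq_true, if_true]
      constructor
      · intro h
        have hm : a ∈ t := by
          rw [← List.count_pos_iff]; omega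
        obtain ⟨k, hk, hka⟩ := List.mem_iff_getElem.mp hm
        refine ⟨0, k + 1, by simp, by simp; omega, by omega, ?_, ?_⟩
        · simp
        · rw [List.getD_cons_succ, pvGetD_eq t k hk, hka]
      · rintro ⟨i, j, hi, hj, hij, hgi, hgj⟩
        have hm : a ∈ t := by
          rcases Nat.eq_zero_or_pos i with h0 | h0
          · subst h0
            obtain ⟨j', rfl⟩ := Nat.exists_eq_succ_of_ne_zero (by omega : j ≠ 0)
            rw [List.getD_cons_succ] at hgj
            rw [pvGetD_eq t j' (by simpa using hj)] at hgj
            rw [← hgj]; exact List.getElem_mem _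
          · obtain ⟨i', rfl⟩ := Nat.exists_eq_succ_of_ne_zero (by omega : i ≠ 0)
            rw [List.getD_cons_succ] at hgi
            rw [pvGetD_eq t i' (by simpa using hi)] at hgi
            rw [← hgi]; exact List.getElem_mem _
        have := List.count_pos_iff.mpr hm
        omega
    · have hne : ¬ (a == p) = true := by simpa using hap
      simp only [hne, Bool.false_eq_true, if_false, Nat.add_zero]
      rw [ih]
      constructor
      · rintro ⟨i, j, hi, hj, hij, hgi, hgj⟩
        exact ⟨i + 1, j + 1, by simpa using hi, by simpa using hj, by omega,
          by rwa [List.getD_cons_succ], by rwa [List.getD_cons_succ]⟩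
      · rintro ⟨i, j, hi, hj, hij, hgi, hgj⟩
        have hi0 : i ≠ 0 := by
          intro h; subst h; simp at hgi; exact hap hgi
        have hj0 : j ≠ 0 := by
          intro h; subst h; simp at hgj; exact hap hgj
        obtain ⟨i', rfl⟩ := Nat.exists_eq_succ_of_ne_zero hi0
        obtain ⟨j', rfl⟩ := Nat.exists_eq_succ_of_ne_zero hj0
        rw [List.getD_cons_succ] at hgi hgj
        exact ⟨i', j', by simpa using hi, by simpa using hj, by omega, hgi, hgj⟩

-- B's decomposition of pvGen: distinct-value pairs plus duplicated values
theorem pvGen_iff (max_y max_x : Int) (l : List (Int × Int)) (y : Int × Int) :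
    pvGen max_y max_x l y ↔
      (∃ a ∈ l, ∃ b ∈ l, a ≠ b ∧ pvC max_y max_x a b y) ∨
      (∃ p ∈ l, 2 ≤ l.count p ∧ pvC max_y max_x p p y) := by
  constructor
  · rintro ⟨i, j, hi, hj, hij, hc⟩
    rw [pvGetD_eq l i hi, pvGetD_eq l j hj] at hc
    by_cases hv : l[i] = l[j]
    · refine Or.inr ⟨l[i], List.getElem_mem _, ?_, ?_⟩
      · rw [pvTwoLeCount_iff]
        exact ⟨i, j, hi, hj, hij, pvGetD_eq l i hi, by rw [pvGetD_eq l j hj, ← hv]⟩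
      · rw [hv] at hc ⊢; exact hc
    · exact Or.inl ⟨l[i], List.getElem_mem _, l[j], List.getElem_mem _, hv, hc⟩
  · rintro (⟨a, ha, b, hb, hab, hc⟩ | ⟨p, hp, hcount, hc⟩)
    · obtain ⟨i, hi, rfl⟩ := List.mem_iff_getElem.mp ha
      obtain ⟨j, hj, rfl⟩ := List.mem_iff_getElem.mp hb
      refine ⟨i, j, hi, hj, ?_, ?_⟩
      · intro h; subst h; exact hab rfl
      · rw [pvGetD_eq l i hi, pvGetD_eq l j hj]; exact hc
    · rw [pvTwoLeCount_iff] at hcount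
      obtain ⟨i, j, hi, hj, hij, hgi, hgj⟩ := hcount
      exact ⟨i, j, hi, hj, hij, by rw [hgi, hgj]; exact hc⟩

-- ---- B side: membership ----

theorem pvB_counts_eq (l : List (Int × Int)) : pvB_counts l = PySem.Dict.counter l :=
  PySem.Dict.foldl_insert_getD_add_one_eq_counter l

theorem pvB_refl_step_mem (max_y max_x : Int) (a b : Int × Int)
    (s : PySem.Set (Int × Int)) (y : Int × Int) :
    y ∈ pvB_refl_step max_y max_x a s b ↔
      y ∈ s ∨ (a ≠ b ∧ pvC max_y max_x a b y) := by
  simp only [pvB_refl_step, pvC, pvInB, pvRefl]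
  split_ifs with he hb <;> (try simp only [PySem.Set.mem_add]) <;> tauto

theorem pvB_inner_mem (max_y max_x : Int) (a : Int × Int) (L : List (Int × Int)) :
    ∀ (s : PySem.Set (Int × Int)) (y : Int × Int),
      y ∈ L.foldl (pvB_refl_step max_y max_x a) s ↔
        y ∈ s ∨ ∃ b ∈ L, a ≠ b ∧ pvC max_y max_x a b y := by
  induction L with
  | nil => simp
  | cons t L ih =>
    intro s y
    rw [List.foldl_cons, ih, pvB_refl_step_mem]
    simp only [List.mem_cons, exists_eq_or_imp]
    rw [or_assoc]

theorem pvB_pairs_mem (max_y max_x : Int) (L : List (Int × Int)) :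
    ∀ (s : PySem.Set (Int × Int)) (y : Int × Int),
      y ∈ pvB_pairs max_y max_x L s ↔
        y ∈ s ∨ ∃ a ∈ L, ∃ b ∈ L, a ≠ b ∧ pvC max_y max_x a b y := by
  unfold pvB_pairs
  have houter : ∀ (E : List (Int × Int)) (s : PySem.Set (Int × Int)) (y : Int × Int),
      y ∈ E.foldl (fun s a => L.foldl (pvB_refl_step max_y max_x a) s) s ↔
        y ∈ s ∨ ∃ a ∈ E, ∃ b ∈ L, a ≠ b ∧ pvC max_y max_x a b y := by
    intro E
    induction E with
    | nil => simp
    | cons t E ih =>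
      intro s y
      rw [List.foldl_cons, ih, pvB_inner_mem]
      simp only [List.mem_cons, exists_eq_or_imp]
      rw [or_assoc]
  exact houter L

theorem pvB_dups_mem (max_y max_x : Int) (items : List ((Int × Int) × Int)) :
    ∀ (s : PySem.Set (Int × Int)) (y : Int × Int),
      y ∈ pvB_dups max_y max_x items s ↔
        y ∈ s ∨ ∃ pc ∈ items, 2 ≤ pc.2 ∧ pvInB max_y max_x pc.1 ∧ y = pc.1 := by
  unfold pvB_dups
  intro s y
  induction items generalizing s with
  | nil => simp
  | cons t items ih =>
    rw [List.foldl_cons]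
    by_cases h : 2 ≤ t.2 ∧ 0 ≤ t.1.1 ∧ t.1.1 < max_y ∧ 0 ≤ t.1.2 ∧ t.1.2 < max_x
    · rw [if_pos h, ih, PySem.Set.mem_add]
      simp only [List.mem_cons, exists_eq_or_imp, pvInB]
      tauto
    · rw [if_neg h, ih]
      simp only [List.mem_cons, exists_eq_or_imp, pvInB]
      tauto

theorem pvB_freq_mem (max_y max_x : Int) (l : List (Int × Int)) :
    ∀ (s : PySem.Set (Int × Int)) (y : Int × Int),
      y ∈ pvB_freq max_y max_x l s ↔ y ∈ s ∨ pvGen max_y max_x l y := by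
  intro s y
  unfold pvB_freq
  rw [pvB_dups_mem, pvB_pairs_mem, pvGen_iff]
  rw [pvB_counts_eq, PySem.Dict.items_counter, PySem.Dict.keys_counter]
  constructor
  · rintro (h | ⟨pc, hpc, h2, hb, rfl⟩)
    · rcases h with (hs | ⟨a, ha, b, hb, hc⟩)
      · exact Or.inl hs
      · rw [PySem.Set.mem_ofList] at ha hb
        exact Or.inr (Or.inl ⟨a, ha, b, hb, hc⟩)
    · rw [List.mem_map] at hpc
      obtain ⟨p, hp, rfl⟩ := hpc
      rw [PySem.Set.mem_ofList] at hp
      refine Or.inr (Or.inr ⟨p, hp, by simp only [] at h2; exact_mod_cast h2, ?_⟩)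
      rw [pvC, pvRefl_self]
      exact ⟨hb, rfl⟩
  · rintro (hs | (⟨a, ha, b, hb, hc⟩ | ⟨p, hp, h2, hc⟩))
    · exact Or.inl (Or.inl hs)
    · refine Or.inl (Or.inr ⟨a, ?_, b, ?_, hc⟩) <;> rw [PySem.Set.mem_ofList] <;> assumption
    · rw [pvC, pvRefl_self] at hc
      refine Or.inr ⟨(p, (l.count p : Int)), ?_, by simp only []; exact_mod_cast h2, hc.1, hc.2⟩
      rw [List.mem_map]
      exact ⟨p, (PySem.Set.mem_ofList _ _).mpr hp, rfl⟩

-- ---- top-level membership ----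

theorem pvA_top_mem (max_y max_x : Int) (m : List (String × List (Int × Int))) :
    ∀ (s : PySem.Set (Int × Int)) (y : Int × Int),
      y ∈ m.foldl (fun s kv => pvA_freq max_y max_x kv.2 s) s ↔
        y ∈ s ∨ ∃ kv ∈ m, pvGen max_y max_x kv.2 y := by
  induction m with
  | nil => simp
  | cons t m ih =>
    intro s y
    rw [List.foldl_cons, ih, pvA_freq_mem]
    simp only [List.mem_cons, exists_eq_or_imp]
    rw [or_assoc]

theorem pvB_top_mem (max_y max_x : Int) (m : List (String × List (Int × Int))) :
    ∀ (s : PySem.Set (Int × Int)) (y : Int × Int),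
      y ∈ m.foldl (fun s kv => pvB_freq max_y max_x kv.2 s) s ↔
        y ∈ s ∨ ∃ kv ∈ m, pvGen max_y max_x kv.2 y := by
  induction m with
  | nil => simp
  | cons t m ih =>
    intro s y
    rw [List.foldl_cons, ih, pvB_freq_mem]
    simp only [List.mem_cons, exists_eq_or_imp]
    rw [or_assoc]

-- ---- Nodup preservation ----

theorem pvA_step_nodup (max_y max_x : Int) (ip jp : Int × (Int × Int))
    (s : PySem.Set (Int × Int)) (hs : List.Nodup s) :
    List.Nodup (pvA_step max_y max_x ip jp s) := by
  simp only [pvA_step]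
  split_ifs <;> first | exact hs | exact PySem.Set.nodup_add _ _ hs

theorem pvA_freq_nodup (max_y max_x : Int) (l : List (Int × Int))
    (s : PySem.Set (Int × Int)) (hs : List.Nodup s) :
    List.Nodup (pvA_freq max_y max_x l s) := by
  unfold pvA_freq
  have hinner : ∀ (ip : Int × (Int × Int)) (E : List (Int × (Int × Int)))
      (s : PySem.Set (Int × Int)), List.Nodup s →
      List.Nodup (E.foldl (fun s jp => pvA_step max_y max_x ip jp s) s) := by
    intro ip E
    induction E with
    | nil => exact fun s hs => hs
    | cons t E ih =>
      intro s hs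
      rw [List.foldl_cons]
      exact ih _ (pvA_step_nodup max_y max_x ip t s hs)
  have houter : ∀ (E : List (Int × (Int × Int))) (s : PySem.Set (Int × Int)), List.Nodup s →
      List.Nodup (E.foldl (fun s ip =>
        (PySem.List.enumerate l).foldl (fun s jp => pvA_step max_y max_x ip jp s) s) s) := by
    intro E
    induction E with
    | nil => exact fun s hs => hs
    | cons t E ih =>
      intro s hs
      rw [List.foldl_cons]
      exact ih _ (hinner t _ s hs)
  exact houter _ s hs

theorem pvB_refl_step_nodup (max_y max_x : Int) (a b : Int × Int)
    (s : PySem.Set (Int × Int)) (hs : List.Nodup s) :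
    List.Nodup (pvB_refl_step max_y max_x a s b) := by
  simp only [pvB_refl_step]
  split_ifs <;> first | exact hs | exact PySem.Set.nodup_add _ _ hs

theorem pvB_freq_nodup (max_y max_x : Int) (l : List (Int × Int))
    (s : PySem.Set (Int × Int)) (hs : List.Nodup s) :
    List.Nodup (pvB_freq max_y max_x l s) := by
  unfold pvB_freq
  have hinner : ∀ (a : Int × Int) (L : List (Int × Int)) (s : PySem.Set (Int × Int)),
      List.Nodup s → List.Nodup (L.foldl (pvB_refl_step max_y max_x a) s) := by
    intro a L
    induction L with
    | nil => exact fun s hs => hs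
    | cons t L ih =>
      intro s hs
      rw [List.foldl_cons]
      exact ih _ (pvB_refl_step_nodup max_y max_x a t s hs)
  have hpairs : ∀ (E L : List (Int × Int)) (s : PySem.Set (Int × Int)), List.Nodup s →
      List.Nodup (E.foldl (fun s a => L.foldl (pvB_refl_step max_y max_x a) s) s) := by
    intro E L
    induction E with
    | nil => exact fun s hs => hs
    | cons t E ih =>
      intro s hs
      rw [List.foldl_cons]
      exact ih _ (hinner t L s hs)
  have hdups : ∀ (items : List ((Int × Int) × Int)) (s : PySem.Set (Int × Int)),
      List.Nodup s → List.Nodup (pvB_dups max_y max_x items s) := by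
    intro items
    unfold pvB_dups
    induction items with
    | nil => exact fun s hs => hs
    | cons t items ih =>
      intro s hs
      rw [List.foldl_cons]
      refine ih _ ?_
      split_ifs <;> first | exact hs | exact PySem.Set.nodup_add _ _ hs
  exact hdups _ _ (hpairs _ _ s hs)

theorem pvA_top_nodup (max_y max_x : Int) (m : List (String × List (Int × Int))) :
    ∀ (s : PySem.Set (Int × Int)), List.Nodup s →
      List.Nodup (m.foldl (fun s kv => pvA_freq max_y max_x kv.2 s) s) := by
  induction m with
  | nil => exact fun s hs => hs
  | cons t m ih =>
    intro s hs
    rw [List.foldl_cons]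
    exact ih _ (pvA_freq_nodup max_y max_x t.2 s hs)

theorem pvB_top_nodup (max_y max_x : Int) (m : List (String × List (Int × Int))) :
    ∀ (s : PySem.Set (Int × Int)), List.Nodup s →
      List.Nodup (m.foldl (fun s kv => pvB_freq max_y max_x kv.2 s) s) := by
  induction m with
  | nil => exact fun s hs => hs
  | cons t m ih =>
    intro s hs
    rw [List.foldl_cons]
    exact ih _ (pvB_freq_nodup max_y max_x t.2 s hs)

-- ===== VERDICT (by name: the statement is the Claim_ definition above) =====
theorem get_number_anti_nodes_spec : Claim_equal_get_number_anti_nodes := by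
  intro max_y max_x m _
  unfold Spec_get_number_anti_nodes get_number_anti_nodes get_number_anti_nodes_alt
  have hperm : (m.foldl (fun s kv => pvA_freq max_y max_x kv.2 s) PySem.Set.empty).Perm
      (m.foldl (fun s kv => pvB_freq max_y max_x kv.2 s) PySem.Set.empty) := by
    rw [List.perm_ext_iff_of_nodup
      (pvA_top_nodup max_y max_x m PySem.Set.empty List.nodup_nil)
      (pvB_top_nodup max_y max_x m PySem.Set.empty List.nodup_nil)]
    intro y
    rw [pvA_top_mem max_y max_x m PySem.Set.empty y, pvB_top_mem max_y max_x m PySem.Set.empty y]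
  have hlen := hperm.length_eq
  simp only [PySem.Set.empty] at hlen
  simp [PySem.Set.len, hlen]
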